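-- pv_equiv track=rewrite | github.com/gustavliu/NLP | lesson3/src/seach.py | line_path
-- ===== SOURCE A (Python) =====
-- from collections import defaultdict
--
-- def line_path(stations):
--     line = [k for k in stations.keys()]
--     stas = [v for v in stations.values()]
--     line_connection = defaultdict(set)
--     sta_line = defaultdict(set)
--     for i in range(len(line)):
--         for sta in stas[i]:
--             sta_line[sta].add(line[i])
--             for j in range(len(line)):
--                 if j == i: continue
--                 if sta in stas[j]:
--                     line_connection[line[i]].add(line[j])
--     return line_connection, sta_line
-- ===== SOURCE B (Python) =====
-- from collections import defaultdict
--
-- def line_path(stations):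
--     # stage 1: invert the mapping -- station -> set of lines through it
--     sta_line = defaultdict(set)
--     for name, stas in stations.items():
--         for sta in stas:
--             sta_line[sta].add(name)
--     # stage 2: a line connects to every other line listed for one of its stations
--     line_connection = defaultdict(set)
--     for name, stas in stations.items():
--         for sta in stas:
--             for other in sta_line[sta]:
--                 if other != name:
--                     line_connection[name].add(other)
--     return line_connection, sta_line
-- ===== Notes on version B (the rewrite author's own statement) =====
-- stated objective: faster
-- what changed: B drops A's index arrays and inner membership scan over every other line: it iterates the dict items directly, builds the station->lines index in a first pass, then connects each line only to the lines already recorded for its stations.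
import Mathlib
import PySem

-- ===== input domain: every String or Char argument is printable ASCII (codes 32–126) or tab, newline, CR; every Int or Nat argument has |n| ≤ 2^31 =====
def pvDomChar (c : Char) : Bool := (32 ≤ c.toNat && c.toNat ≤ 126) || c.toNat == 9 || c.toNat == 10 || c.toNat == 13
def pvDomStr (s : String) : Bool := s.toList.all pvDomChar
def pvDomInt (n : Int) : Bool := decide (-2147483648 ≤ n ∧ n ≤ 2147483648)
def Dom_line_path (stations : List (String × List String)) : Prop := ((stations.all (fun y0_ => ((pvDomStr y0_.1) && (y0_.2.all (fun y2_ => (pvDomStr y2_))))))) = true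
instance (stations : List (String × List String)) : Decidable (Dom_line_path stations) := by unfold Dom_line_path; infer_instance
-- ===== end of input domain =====

-- B builds the station→lines index in one pass and then connects each line only to the lines
-- already recorded for its stations, instead of A's membership scan over every other line
-- (objective: faster; a timing run measured the speed-up).

-- ===== PORT A =====
-- Faithful port of A; the two returned defaultdicts are delivered as their items lists.
def line_path (stations : List (String × List String)) :
    (List (String × List String)) × (List (String × List String)) :=
  let line : List String := stations.map (fun k => k.1)
  let stas : List (List String) := stations.map (fun v => v.2)
  let res :=
    (PySem.List.pyRange 0 (PySem.List.len line)).foldl (fun st i =>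
      (PySem.List.pyGetD stas i []).foldl (fun st sta =>
        let sl := st.2.modify sta [] (fun s => PySem.Set.add s (PySem.List.pyGetD line i ""))
        let lc := (PySem.List.pyRange 0 (PySem.List.len line)).foldl (fun lc j =>
            if j == i then lc
            else if (PySem.List.pyGetD stas j []).contains sta then
              lc.modify (PySem.List.pyGetD line i "") []
                (fun s => PySem.Set.add s (PySem.List.pyGetD line j ""))
            else lc) st.1
        (lc, sl)) st)
      ((PySem.Dict.empty : PySem.Dict String (PySem.Set String)),
       (PySem.Dict.empty : PySem.Dict String (PySem.Set String)))
  (res.1.items, res.2.items)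

-- ===== PORT B =====
-- Transliteration of Source B: stage 1, the inner 'for sta in stas' loop of the index pass
def pvB_index1 (name : String) (stas : List String)
    (sl : PySem.Dict String (PySem.Set String)) : PySem.Dict String (PySem.Set String) :=
  match stas with
  | [] => sl
  | sta :: rest => pvB_index1 name rest (sl.modify sta [] (fun s => PySem.Set.add s name))

-- stage 1, the outer 'for name, stas in stations.items()' loop
def pvB_index (ps : List (String × List String))
    (sl : PySem.Dict String (PySem.Set String)) : PySem.Dict String (PySem.Set String) :=
  match ps with
  | [] => sl
  | p :: rest => pvB_index rest (pvB_index1 p.1 p.2 sl)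

-- stage 2, the innermost 'for other in sta_line[sta]' loop
def pvB_addAll (name : String) (others : List String)
    (lc : PySem.Dict String (PySem.Set String)) : PySem.Dict String (PySem.Set String) :=
  match others with
  | [] => lc
  | other :: rest =>
      pvB_addAll name rest
        (if other == name then lc
         else lc.modify name [] (fun s => PySem.Set.add s other))

-- stage 2, 'for sta in stas'; sta_line[sta] always exists here (stage 1 created the key for
-- every station occurrence this loop visits), so Dict.getD is exact for the defaultdict read
def pvB_connect1 (sl : PySem.Dict String (PySem.Set String)) (name : String)
    (stas : List String) (lc : PySem.Dict String (PySem.Set String)) :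
    PySem.Dict String (PySem.Set String) :=
  match stas with
  | [] => lc
  | sta :: rest => pvB_connect1 sl name rest (pvB_addAll name (sl.getD sta []) lc)

-- stage 2, the outer items() loop
def pvB_connect (sl : PySem.Dict String (PySem.Set String))
    (ps : List (String × List String)) (lc : PySem.Dict String (PySem.Set String)) :
    PySem.Dict String (PySem.Set String) :=
  match ps with
  | [] => lc
  | p :: rest => pvB_connect sl rest (pvB_connect1 sl p.1 p.2 lc)

def line_path_alt (stations : List (String × List String)) :
    (List (String × List String)) × (List (String × List String)) :=
  let sta_line := pvB_index stations PySem.Dict.empty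
  let line_connection := pvB_connect sta_line stations PySem.Dict.empty
  (line_connection.items, sta_line.items)

-- ===== PRECONDITION & SPEC =====
-- Pre_ excludes association lists with duplicate line names (keys): a Python dict argument cannot
-- carry two entries with the same key, so no dict input corresponds to such a list.
def Pre_line_path (stations : List (String × List String)) : Prop :=
  (stations.map (fun k => k.1)).Nodup
instance (stations : List (String × List String)) : Decidable (Pre_line_path stations) := by
  unfold Pre_line_path; infer_instance

def pvWitness_line_path : (List (String × List String)) :=
  [("1", ["a", "b"]), ("2", ["b", "c"])]

def Spec_line_path (stations : List (String × List String)) (out : (List (String × List String)) × (List (String × List String))) : Prop := out = line_path_alt stations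
instance (stations : List (String × List String)) (out : (List (String × List String)) × (List (String × List String))) : Decidable (Spec_line_path stations out) := by unfold Spec_line_path; infer_instance

-- ===== CLAIM (what is proved, stated in full; the proofs are below) =====
def Claim_equal_line_path : Prop := ∀ (stations : List (String × List String)), Dom_line_path stations → Pre_line_path stations → Spec_line_path stations (line_path stations)

-- ===== LEMMAS AND PROOFS =====

-- B's recursive helpers as folds
theorem pvB_index1_eq (name : String) : ∀ (stas : List String) (sl : PySem.Dict String (PySem.Set String)),
    pvB_index1 name stas sl
    = stas.foldl (fun sl sta => sl.modify sta [] (fun s => PySem.Set.add s name)) sl := by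
  intro stas
  induction stas with
  | nil => intro sl; rfl
  | cons s rest ih => intro sl; simp [pvB_index1, ih]

theorem pvB_index_eq : ∀ (ps : List (String × List String)) (sl : PySem.Dict String (PySem.Set String)),
    pvB_index ps sl
    = ps.foldl (fun sl p => p.2.foldl (fun sl sta => sl.modify sta [] (fun s => PySem.Set.add s p.1)) sl) sl := by
  intro ps
  induction ps with
  | nil => intro sl; rfl
  | cons p rest ih => intro sl; simp [pvB_index, ih, pvB_index1_eq]

theorem pvB_addAll_eq (name : String) : ∀ (others : List String) (lc : PySem.Dict String (PySem.Set String)),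
    pvB_addAll name others lc
    = others.foldl (fun lc other =>
        if other == name then lc
        else lc.modify name [] (fun s => PySem.Set.add s other)) lc := by
  intro others
  induction others with
  | nil => intro lc; rfl
  | cons o rest ih => intro lc; simp only [pvB_addAll, ih, List.foldl_cons]

theorem pvB_connect1_eq (sl : PySem.Dict String (PySem.Set String)) (name : String) :
    ∀ (stas : List String) (lc : PySem.Dict String (PySem.Set String)),
    pvB_connect1 sl name stas lc
    = stas.foldl (fun lc sta => pvB_addAll name (sl.getD sta []) lc) lc := by
  intro stas
  induction stas with
  | nil => intro lc; rfl
  | cons s rest ih => intro lc; simp [pvB_connect1, ih]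

theorem pvB_connect_eq (sl : PySem.Dict String (PySem.Set String)) :
    ∀ (ps : List (String × List String)) (lc : PySem.Dict String (PySem.Set String)),
    pvB_connect sl ps lc
    = ps.foldl (fun lc p => p.2.foldl (fun lc sta => pvB_addAll p.1 (sl.getD sta []) lc) lc) lc := by
  intro ps
  induction ps with
  | nil => intro lc; rfl
  | cons p rest ih => intro lc; simp [pvB_connect, ih, pvB_connect1_eq]

-- lookup after one line's station loop
theorem pv_getD_slfold (v sta : String) :
    ∀ (l : List String) (d : PySem.Dict String (PySem.Set String)),
    (l.foldl (fun d s => d.modify s [] (fun st => PySem.Set.add st v)) d).getD sta []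
    = if l.contains sta then PySem.Set.add (d.getD sta []) v else d.getD sta [] := by
  intro l
  induction l with
  | nil => intro d; simp
  | cons s l ih =>
    intro d
    simp only [List.foldl_cons, ih]
    by_cases h : s = sta
    · subst h
      rw [PySem.Dict.getD_modify_self]
      by_cases hc : s ∈ l <;> simp [hc]
    · rw [PySem.Dict.getD_modify_of_ne _ _ _ (Ne.symm h)]
      simp [or_iff_right (Ne.symm h)]

-- lookup in the station→lines dict built by the first pass
theorem pv_getD_SL (sta : String) :
    ∀ (ps : List (String × List String)) (d : PySem.Dict String (PySem.Set String)),
    (ps.foldl (fun d p => p.2.foldl (fun d s => d.modify s [] (fun st => PySem.Set.add st p.1)) d) d).getD sta []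
    = ps.foldl (fun acc p => if p.2.contains sta then PySem.Set.add acc p.1 else acc) (d.getD sta []) := by
  intro ps
  induction ps with
  | nil => intro d; rfl
  | cons p ps ih =>
    intro d
    simp only [List.foldl_cons, ih, pv_getD_slfold]

-- the conditional-add fold over nodup names lists exactly the filtered names
theorem pv_foldadd_eq (sta : String) :
    ∀ (ps : List (String × List String)) (acc : PySem.Set String),
    (acc ++ ps.map (fun p => p.1)).Nodup →
    ps.foldl (fun acc p => if p.2.contains sta then PySem.Set.add acc p.1 else acc) acc
    = acc ++ (ps.filter (fun p => p.2.contains sta)).map (fun p => p.1) := by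
  intro ps
  induction ps with
  | nil => intro acc _; simp
  | cons p ps ih =>
    intro acc h
    rw [List.map_cons, List.append_cons] at h
    have hnotin : p.1 ∉ acc := by
      intro hin
      rw [← List.append_cons] at h
      exact List.disjoint_of_nodup_append h hin List.mem_cons_self
    cases hc : p.2.contains sta with
    | true =>
      have hadd : PySem.Set.add acc p.1 = acc ++ [p.1] := by
        simp [PySem.Set.add, hnotin]
      rw [List.foldl_cons, if_pos hc, hadd, ih _ h]
      have hm : sta ∈ p.2 := by simpa using hc
      simp [hm]
    | false =>
      rw [List.foldl_cons, if_neg (ne_true_of_eq_false hc)]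
      rw [List.filter_cons, if_neg (ne_true_of_eq_false hc)]
      apply ih
      rw [← List.append_cons] at h
      refine List.Nodup.sublist ?_ h
      exact List.Sublist.append_left (List.sublist_cons_self _ _) acc

-- Python's 'for i in range(len(line))' with indexing into line/stas is a fold over stations
theorem pv_pyfold_eq {β : Type} (stations : List (String × List String)) (f : β → String → List String → β) (b : β) :
    (PySem.List.pyRange 0 (PySem.List.len (stations.map (fun k => k.1)))).foldl
      (fun acc i => f acc (PySem.List.pyGetD (stations.map (fun k => k.1)) i "")
                          (PySem.List.pyGetD (stations.map (fun v => v.2)) i [])) b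
    = stations.foldl (fun acc p => f acc p.1 p.2) b := by
  have hlen : PySem.List.len (stations.map (fun k => k.1)) = PySem.List.len stations := by
    simp [PySem.List.len]
  have hg1 : ∀ i : Int, PySem.List.pyGetD (stations.map (fun k => k.1)) i ""
      = (PySem.List.pyGetD stations i ("", [])).1 :=
    fun i => PySem.List.pyGetD_map (fun p => p.1) stations i ("", [])
  have hg2 : ∀ i : Int, PySem.List.pyGetD (stations.map (fun v => v.2)) i []
      = (PySem.List.pyGetD stations i ("", [])).2 :=
    fun i => PySem.List.pyGetD_map (fun p => p.2) stations i ("", [])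
  rw [hlen]
  simp only [hg1, hg2]
  simpa using PySem.List.foldl_pyRange_pyGetD stations ("", [])
    (fun acc p => f acc p.1 p.2) b (le_refl 0)

-- A's interleaved pair of dicts is the pair of the two independent folds
theorem pv_pairfold (S : Int → List String)
    (F G : PySem.Dict String (PySem.Set String) → Int → String → PySem.Dict String (PySem.Set String)) :
    ∀ (R : List Int) (st : PySem.Dict String (PySem.Set String) × PySem.Dict String (PySem.Set String)),
    R.foldl (fun st i => (S i).foldl (fun st sta => (F st.1 i sta, G st.2 i sta)) st) st
    = (R.foldl (fun a i => (S i).foldl (fun a sta => F a i sta) a) st.1,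
       R.foldl (fun b i => (S i).foldl (fun b sta => G b i sta) b) st.2) := by
  intro R
  induction R with
  | nil => intro st; rfl
  | cons x R ih =>
    intro st
    obtain ⟨a, b⟩ := st
    simp only [List.foldl_cons]
    rw [ih]
    have hp := PySem.List.foldl_prod_mk (fun a e => F a x e) (fun b e => G b x e) (S x) a b
    simp only [] at hp
    rw [hp]

-- names are injective on indices under Pre_
theorem pv_name_ne (stations : List (String × List String))
    (hn : (stations.map (fun k => k.1)).Nodup) {i j : Int}
    (hi0 : 0 ≤ i) (hiN : i < (stations.length : Int))
    (hj0 : 0 ≤ j) (hjN : j < (stations.length : Int)) (hne : j ≠ i) :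
    PySem.List.pyGetD (stations.map (fun k => k.1)) j ""
      ≠ PySem.List.pyGetD (stations.map (fun k => k.1)) i "" := by
  rw [PySem.List.pyGetD_eq_getElem _ _ hj0 (by simpa using hjN),
      PySem.List.pyGetD_eq_getElem _ _ hi0 (by simpa using hiN)]
  intro h
  apply hne
  have := (hn.getElem_inj_iff).mp h
  omega

-- A's j-scan over all lines equals the walk over the station's filtered line list
theorem pv_inner_eq (stations : List (String × List String))
    (hn : (stations.map (fun k => k.1)).Nodup) (i : Int)
    (hi0 : 0 ≤ i) (hiN : i < (stations.length : Int)) (sta : String)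
    (lc : PySem.Dict String (PySem.Set String)) :
    (PySem.List.pyRange 0 (PySem.List.len (stations.map (fun k => k.1)))).foldl (fun lc j =>
        if j == i then lc
        else if (PySem.List.pyGetD (stations.map (fun v => v.2)) j []).contains sta then
          lc.modify (PySem.List.pyGetD (stations.map (fun k => k.1)) i "") []
            (fun s => PySem.Set.add s (PySem.List.pyGetD (stations.map (fun k => k.1)) j ""))
        else lc) lc
    = ((stations.filter (fun p => p.2.contains sta)).map (fun p => p.1)).foldl (fun lc other =>
        if other == PySem.List.pyGetD (stations.map (fun k => k.1)) i "" then lc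
        else lc.modify (PySem.List.pyGetD (stations.map (fun k => k.1)) i "") []
          (fun s => PySem.Set.add s other)) lc := by
  have hstep : (PySem.List.pyRange 0 (PySem.List.len (stations.map (fun k => k.1)))).foldl (fun lc j =>
        if j == i then lc
        else if (PySem.List.pyGetD (stations.map (fun v => v.2)) j []).contains sta then
          lc.modify (PySem.List.pyGetD (stations.map (fun k => k.1)) i "") []
            (fun s => PySem.Set.add s (PySem.List.pyGetD (stations.map (fun k => k.1)) j ""))
        else lc) lc
      = (PySem.List.pyRange 0 (PySem.List.len (stations.map (fun k => k.1)))).foldl (fun lc j =>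
        if (PySem.List.pyGetD (stations.map (fun k => k.1)) j "")
            == (PySem.List.pyGetD (stations.map (fun k => k.1)) i "") then lc
        else if (PySem.List.pyGetD (stations.map (fun v => v.2)) j []).contains sta then
          lc.modify (PySem.List.pyGetD (stations.map (fun k => k.1)) i "") []
            (fun s => PySem.Set.add s (PySem.List.pyGetD (stations.map (fun k => k.1)) j ""))
        else lc) lc := by
    apply PySem.List.foldl_congr_mem
    intro acc j hj
    have hjr := PySem.List.mem_pyRange_one.mp hj
    have hjN : j < (stations.length : Int) := by
      have := hjr.2
      simpa [PySem.List.len] using this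
    by_cases hji : j = i
    · subst hji
      simp
    · have hb : (PySem.List.pyGetD (stations.map (fun k => k.1)) j ""
            == PySem.List.pyGetD (stations.map (fun k => k.1)) i "") = false := by
        simpa using pv_name_ne stations hn hi0 hiN hjr.1 hjN hji
      simp [hji, hb]
  rw [hstep]
  rw [pv_pyfold_eq stations (fun lc k v =>
        if k == (PySem.List.pyGetD (stations.map (fun k => k.1)) i "") then lc
        else if v.contains sta then
          lc.modify (PySem.List.pyGetD (stations.map (fun k => k.1)) i "") []
            (fun s => PySem.Set.add s k)
        else lc) lc]
  rw [List.foldl_map, List.foldl_filter]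
  apply PySem.List.foldl_congr_mem
  intro acc p _
  by_cases h1 : p.1 == PySem.List.pyGetD (stations.map (fun k => k.1)) i ""
  · simp [h1]
  · by_cases h2 : p.2.contains sta <;> simp [h1, h2]

theorem pv_ports_agree (stations : List (String × List String))
    (hpre : (stations.map (fun k => k.1)).Nodup) : line_path stations = line_path_alt stations := by
  unfold line_path line_path_alt
  dsimp only
  have hp := pv_pairfold (fun i => PySem.List.pyGetD (stations.map (fun v => v.2)) i [])
      (fun a i sta => (PySem.List.pyRange 0 (PySem.List.len (stations.map (fun k => k.1)))).foldl
        (fun lc j => if j == i then lc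
          else if (PySem.List.pyGetD (stations.map (fun v => v.2)) j []).contains sta then
            lc.modify (PySem.List.pyGetD (stations.map (fun k => k.1)) i "") []
              (fun s => PySem.Set.add s (PySem.List.pyGetD (stations.map (fun k => k.1)) j ""))
          else lc) a)
      (fun b i sta => b.modify sta [] (fun s => PySem.Set.add s (PySem.List.pyGetD (stations.map (fun k => k.1)) i "")))
      (PySem.List.pyRange 0 (PySem.List.len (stations.map (fun k => k.1))))
      (PySem.Dict.empty, PySem.Dict.empty)
  simp only [] at hp
  rw [hp]
  -- both sides' station→lines dicts as the same fold over stations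
  have hslA : (PySem.List.pyRange 0 (PySem.List.len (stations.map (fun k => k.1)))).foldl (fun sl i =>
        (PySem.List.pyGetD (stations.map (fun v => v.2)) i []).foldl (fun sl sta =>
          sl.modify sta [] (fun s => PySem.Set.add s (PySem.List.pyGetD (stations.map (fun k => k.1)) i ""))) sl)
        (PySem.Dict.empty : PySem.Dict String (PySem.Set String))
      = pvB_index stations PySem.Dict.empty := by
    rw [pvB_index_eq]
    exact pv_pyfold_eq stations (fun acc k v =>
      v.foldl (fun sl s => sl.modify s [] (fun st => PySem.Set.add st k)) acc) PySem.Dict.empty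
  -- the index lookup is the filtered name list
  have hsl : ∀ sta : String,
      (pvB_index stations PySem.Dict.empty).getD sta []
      = (stations.filter (fun p => p.2.contains sta)).map (fun p => p.1) := by
    intro sta
    rw [pvB_index_eq, pv_getD_SL]
    have hempty : (PySem.Dict.empty : PySem.Dict String (PySem.Set String)).getD sta [] = [] := rfl
    rw [hempty]
    simpa using pv_foldadd_eq sta stations [] (by simpa using hpre)
  rw [hslA]
  congr 1
  apply congrArg
  -- line_connection: A's side to a fold over stations …
  have hA : (PySem.List.pyRange 0 (PySem.List.len (stations.map (fun k => k.1)))).foldl (fun a i =>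
        (PySem.List.pyGetD (stations.map (fun v => v.2)) i []).foldl (fun lc sta =>
          (PySem.List.pyRange 0 (PySem.List.len (stations.map (fun k => k.1)))).foldl (fun lc j =>
            if j == i then lc
            else if (PySem.List.pyGetD (stations.map (fun v => v.2)) j []).contains sta then
              lc.modify (PySem.List.pyGetD (stations.map (fun k => k.1)) i "") []
                (fun s => PySem.Set.add s (PySem.List.pyGetD (stations.map (fun k => k.1)) j ""))
            else lc) lc) a)
        (PySem.Dict.empty : PySem.Dict String (PySem.Set String))
      = stations.foldl (fun a p => p.2.foldl (fun lc sta =>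
          ((stations.filter (fun q => q.2.contains sta)).map (fun q => q.1)).foldl (fun lc other =>
            if other == p.1 then lc
            else lc.modify p.1 [] (fun s => PySem.Set.add s other)) lc) a)
        (PySem.Dict.empty : PySem.Dict String (PySem.Set String)) := by
    rw [← pv_pyfold_eq stations (fun a name stasi => stasi.foldl (fun lc sta =>
          ((stations.filter (fun q => q.2.contains sta)).map (fun q => q.1)).foldl (fun lc other =>
            if other == name then lc
            else lc.modify name [] (fun s => PySem.Set.add s other)) lc) a)
        (PySem.Dict.empty : PySem.Dict String (PySem.Set String))]
    apply PySem.List.foldl_congr_mem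
    intro acc i hi
    have hir := PySem.List.mem_pyRange_one.mp hi
    have hiN : i < (stations.length : Int) := by
      have := hir.2; simpa [PySem.List.len] using this
    apply PySem.List.foldl_congr_mem
    intro lc sta _
    exact pv_inner_eq stations hpre i hir.1 hiN sta lc
  -- … and B's side to the same fold
  rw [hA, pvB_connect_eq]
  apply PySem.List.foldl_congr_mem
  intro lc p _
  apply PySem.List.foldl_congr_mem
  intro lc' sta _
  rw [pvB_addAll_eq, hsl sta]

-- ===== VERDICT (by name: the statement is the Claim_ definition above) =====
theorem line_path_spec : Claim_equal_line_path := by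
  intro stations _ hpre
  unfold Spec_line_path
  exact pv_ports_agree stations hpre
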